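-- pv_equiv track=rewrite | github.com/8DE4732A/ccode | ccode.py | build_models_by_owner
-- ===== SOURCE A (Python) =====
-- def build_models_by_owner(
--     models_data: list[dict[str, str]] | None,
-- ) -> dict[str, list[str]]:
--     by_owner: dict[str, list[str]] = {}
--     for item in models_data or []:
--         owned_by = item.get("owned_by")
--         model_id = item.get("id")
--         if not isinstance(owned_by, str) or not isinstance(model_id, str):
--             continue
--         by_owner.setdefault(owned_by, []).append(model_id)
--     for owner in by_owner:
--         by_owner[owner] = sorted(by_owner[owner])
--     return by_owner
-- ===== SOURCE B (Python) =====
-- def build_models_by_owner(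
--     models_data: list[dict[str, str]] | None,
-- ) -> dict[str, list[str]]:
--     pairs = [
--         (item.get("owned_by"), item.get("id"))
--         for item in (models_data or [])
--         if isinstance(item.get("owned_by"), str) and isinstance(item.get("id"), str)
--     ]
--     return {
--         owner: sorted(mid for ow, mid in pairs if ow == owner)
--         for owner, _ in pairs
--     }
-- ===== Notes on version B (the rewrite author's own statement) =====
-- stated objective: alternative
-- what changed: B replaces A's build-groups-then-sort-each-group-in-place loops with one list comprehension extracting the valid (owner, id) pairs followed by a dict comprehension that computes each owner's sorted id list directly from that pair list.
import Mathlib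
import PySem

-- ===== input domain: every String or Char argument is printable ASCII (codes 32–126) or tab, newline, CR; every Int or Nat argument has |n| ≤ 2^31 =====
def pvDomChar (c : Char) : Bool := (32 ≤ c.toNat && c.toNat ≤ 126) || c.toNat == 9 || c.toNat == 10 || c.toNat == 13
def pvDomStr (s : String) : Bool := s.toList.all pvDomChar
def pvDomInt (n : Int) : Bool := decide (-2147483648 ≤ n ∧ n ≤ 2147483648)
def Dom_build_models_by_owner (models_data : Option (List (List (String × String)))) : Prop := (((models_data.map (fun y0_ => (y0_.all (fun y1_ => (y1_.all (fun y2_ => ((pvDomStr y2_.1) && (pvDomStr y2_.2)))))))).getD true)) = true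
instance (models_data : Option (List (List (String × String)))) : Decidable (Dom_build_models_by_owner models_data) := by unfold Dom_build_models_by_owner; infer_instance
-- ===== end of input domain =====

-- B rebuilds the same owner → sorted-ids dict from a single filtered pair list via a
-- dict comprehension (key order and per-group order match A); objective: alternative.

-- ===== PORT A =====
-- setdefault(owner, []).append(id) ≡ Dict.modify owner [] (· ++ [id]); the final Python
-- loop reassigns each existing key in iteration order ≡ map over the items.
def build_models_by_owner (models_data : Option (List (List (String × String)))) : List (String × List String) :=
  let by_owner := (models_data.getD []).foldl (fun d item =>
      match (PySem.Dict.mk item).get? "owned_by", (PySem.Dict.mk item).get? "id" with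
      | some ow, some mid => d.modify ow [] (fun v => v ++ [mid])
      | _, _ => d) PySem.Dict.empty
  by_owner.items.map (fun kv => (kv.1, PySem.List.sorted kv.2 (fun x => x) false))

-- ===== PORT B =====
def build_models_by_owner_alt (models_data : Option (List (List (String × String)))) : List (String × List String) :=
  let pairs := (models_data.getD []).filterMap (fun item =>
      match (PySem.Dict.mk item).get? "owned_by" with
      | none => none
      | some ow =>
        match (PySem.Dict.mk item).get? "id" with
        | none => none
        | some mid => some (ow, mid))
  (pairs.foldl (fun d p =>
      d.insert p.1 (PySem.List.sorted ((pairs.filter (fun q => q.1 == p.1)).map (fun q => q.2)) (fun x => x) false))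
    PySem.Dict.empty).items

-- ===== PRECONDITION & SPEC =====
def Spec_build_models_by_owner (models_data : Option (List (List (String × String)))) (out : List (String × List String)) : Prop := out = build_models_by_owner_alt models_data
instance (models_data : Option (List (List (String × String)))) (out : List (String × List String)) : Decidable (Spec_build_models_by_owner models_data out) := by unfold Spec_build_models_by_owner; infer_instance

-- ===== CLAIM (what is proved, stated in full; the proofs are below) =====
def Claim_equal_build_models_by_owner : Prop := ∀ (models_data : Option (List (List (String × String)))), Dom_build_models_by_owner models_data → Spec_build_models_by_owner models_data (build_models_by_owner models_data)

-- ===== LEMMAS AND PROOFS =====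

-- A's loop over items equals the same grouping loop over the filtered pair list
theorem pvFoldA_eq (l : List (List (String × String))) (d : PySem.Dict String (List String)) :
    l.foldl (fun d item =>
      match (PySem.Dict.mk item).get? "owned_by", (PySem.Dict.mk item).get? "id" with
      | some ow, some mid => d.modify ow [] (fun v => v ++ [mid])
      | _, _ => d) d
    = (l.filterMap (fun item =>
        match (PySem.Dict.mk item).get? "owned_by" with
        | none => none
        | some ow =>
          match (PySem.Dict.mk item).get? "id" with
          | none => none
          | some mid => some (ow, mid))).foldl (fun d p => d.modify p.1 [] (fun v => v ++ [p.2])) d := by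
  induction l generalizing d with
  | nil => rfl
  | cons item t ih =>
    simp only [List.foldl_cons, List.filterMap_cons]
    rcases h1 : (PySem.Dict.mk item).get? "owned_by" with _ | ow <;>
      rcases h2 : (PySem.Dict.mk item).get? "id" with _ | mid <;>
      simp [ih]

-- a fold of inserts whose inserted value depends only on the key: the final lookup
theorem pvFoldB_getD (c : String → List String) (l : List (String × String))
    (d : PySem.Dict String (List String)) (k : String) :
    (l.foldl (fun d p => d.insert p.1 (c p.1)) d).getD k []
      = if l.any (fun p => p.1 == k) then c k else d.getD k [] := by
  induction l generalizing d with
  | nil => rfl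
  | cons p t ih =>
    simp only [List.foldl_cons, List.any_cons]
    by_cases hk : p.1 = k
    · subst hk
      rw [ih]
      by_cases ht : t.any (fun q => q.1 == p.1)
      · simp [ht]
      · simp [ht, PySem.Dict.getD_insert_self]
    · rw [ih]
      have hbe : (p.1 == k) = false := beq_eq_false_iff_ne.mpr hk
      simp only [hbe, Bool.false_or]
      rw [PySem.Dict.getD_insert_of_ne d (c p.1) [] (Ne.symm hk)]

-- the core equality, over the extracted (owner, id) pair list
theorem pvMain (pairs : List (String × String)) :
    (pairs.foldl (fun d p => d.modify p.1 [] (fun v => v ++ [p.2])) PySem.Dict.empty).items.map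
        (fun kv => (kv.1, PySem.List.sorted kv.2 (fun x => x) false))
    = (pairs.foldl (fun d p =>
        d.insert p.1 (PySem.List.sorted ((pairs.filter (fun q => q.1 == p.1)).map (fun q => q.2)) (fun x => x) false))
      PySem.Dict.empty).items := by
  set c : String → List String := fun k =>
    PySem.List.sorted ((pairs.filter (fun q => q.1 == k)).map (fun q => q.2)) (fun x => x) false with hc
  set dA := pairs.foldl (fun d p => d.modify p.1 [] (fun v => v ++ [p.2])) PySem.Dict.empty with hdA
  set dB := pairs.foldl (fun d p => d.insert p.1 (c p.1)) PySem.Dict.empty with hdB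
  have hndA : dA.keys.Nodup :=
    PySem.Dict.nodup_keys_foldl_modify_key pairs (fun p => p.1) [] (fun _ p v => v ++ [p.2])
      PySem.Dict.empty (by simp)
  have hndB : dB.keys.Nodup :=
    PySem.Dict.nodup_keys_foldl_insert_key pairs (fun p => p.1) (fun _ p => c p.1)
      PySem.Dict.empty (by simp)
  have hkeysA : dA.keys = PySem.Set.update (PySem.Dict.keys (PySem.Dict.empty (κ := String) (ν := List String))) (pairs.map (fun p => p.1)) :=
    PySem.Dict.keys_foldl_modify_key pairs (fun p => p.1) [] (fun _ p v => v ++ [p.2]) PySem.Dict.empty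
  have hkeysB : dB.keys = PySem.Set.update (PySem.Dict.keys (PySem.Dict.empty (κ := String) (ν := List String))) (pairs.map (fun p => p.1)) :=
    PySem.Dict.keys_foldl_insert_key pairs (fun p => p.1) (fun _ p => c p.1) PySem.Dict.empty
  have hkeys : dB.keys = dA.keys := hkeysB.trans hkeysA.symm
  rw [PySem.Dict.items_eq_map_keys dA hndA [], PySem.Dict.items_eq_map_keys dB hndB [],
    hkeys, List.map_map]
  apply List.map_congr_left
  intro k hk
  have hkmem : k ∈ pairs.map (fun p => p.1) := by
    rw [hkeysA] at hk
    simpa [PySem.Dict.keys_empty, PySem.Set.update_nil_left, PySem.Set.mem_ofList] using hk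
  have hany : pairs.any (fun p => p.1 == k) = true := by
    rcases List.mem_map.1 hkmem with ⟨p, hpmem, hpk⟩
    exact List.any_eq_true.2 ⟨p, hpmem, by simp [hpk]⟩
  have hA : dA.getD k [] = (pairs.filter (fun p => p.1 == k)).map (fun p => p.2) := by
    rw [hdA, PySem.Dict.getD_foldl_modify_append]
    simp
  have hB : dB.getD k [] = c k := by
    rw [hdB, pvFoldB_getD, hany]
    rfl
  simp only [Function.comp, hA, hB, hc]

-- ===== VERDICT (by name: the statement is the Claim_ definition above) =====
theorem build_models_by_owner_spec : Claim_equal_build_models_by_owner := by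
  intro md _
  unfold Spec_build_models_by_owner
  show (((md.getD []).foldl (fun d item =>
      match (PySem.Dict.mk item).get? "owned_by", (PySem.Dict.mk item).get? "id" with
      | some ow, some mid => d.modify ow [] (fun v => v ++ [mid])
      | _, _ => d) PySem.Dict.empty).items.map
        (fun kv => (kv.1, PySem.List.sorted kv.2 (fun x => x) false)))
    = build_models_by_owner_alt md
  rw [pvFoldA_eq]
  exact pvMain _
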